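-- pv_equiv track=rewrite | github.com/liucaomics/practice | LeetCode/python3/905_sortArrayByParity.py | sortArrayByParity
-- ===== SOURCE A (Python) =====
-- from typing import List
--
-- def sortArrayByParity(A: List[int]) -> List[int]:
--     list_odd = []
--     list_even = []
--     for i in A:
--         if i % 2 ==0:
--             list_even.append(i)
--         else:
--             list_odd.append(i)
--     return list_even + list_odd
-- ===== SOURCE B (Python) =====
-- from typing import List
--
-- def sortArrayByParity(A: List[int]) -> List[int]:
--     return sorted(A, key=lambda x: x % 2)
-- ===== Notes on version B (the rewrite author's own statement) =====
-- stated objective: idiomatic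
-- what changed: Replaces the explicit two-list partition loop with a single stable sort keyed on x % 2 (sorted(A, key=lambda x: x % 2)); stability preserves the relative order within each parity class, so the result is identical.
import Mathlib
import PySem

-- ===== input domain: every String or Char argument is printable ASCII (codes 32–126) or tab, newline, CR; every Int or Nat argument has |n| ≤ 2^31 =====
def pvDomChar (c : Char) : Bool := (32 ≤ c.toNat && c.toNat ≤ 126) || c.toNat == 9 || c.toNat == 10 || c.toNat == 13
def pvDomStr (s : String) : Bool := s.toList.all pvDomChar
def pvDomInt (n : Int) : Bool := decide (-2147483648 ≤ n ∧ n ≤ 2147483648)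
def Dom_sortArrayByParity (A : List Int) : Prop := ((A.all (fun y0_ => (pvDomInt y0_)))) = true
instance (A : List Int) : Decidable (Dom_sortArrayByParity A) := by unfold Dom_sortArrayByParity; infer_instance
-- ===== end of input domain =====

-- B replaces A's explicit two-list partition loop with one stable sort keyed on x % 2 (more idiomatic, same result).


-- ===== PORT A =====
-- literal transliteration of A: one pass appending to list_odd / list_even, return list_even ++ list_odd
def sortArrayByParity (A : List Int) : List Int :=
  let p := A.foldl
    (fun (acc : List Int × List Int) i =>
      if PySem.Int.mod i 2 = 0 then (acc.1, acc.2 ++ [i]) else (acc.1 ++ [i], acc.2))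
    ([], [])   -- (list_odd, list_even)
  p.2 ++ p.1

-- ===== PORT B =====
-- literal transliteration of B: sorted(A, key=lambda x: x % 2)
def sortArrayByParity_alt (A : List Int) : List Int :=
  PySem.List.sorted A (fun x => PySem.Int.mod x 2) false

-- ===== PRECONDITION & SPEC =====
def Spec_sortArrayByParity (A : List Int) (out : List Int) : Prop := out = sortArrayByParity_alt A
instance (A : List Int) (out : List Int) : Decidable (Spec_sortArrayByParity A out) := by unfold Spec_sortArrayByParity; infer_instance

-- ===== CLAIM (what is proved, stated in full; the proofs are below) =====
def Claim_equal_sortArrayByParity : Prop := ∀ (A : List Int), Dom_sortArrayByParity A → Spec_sortArrayByParity A (sortArrayByParity A)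

-- ===== LEMMAS AND PROOFS =====

-- A's loop invariant: the fold extends the odd/even accumulators with the parity filters.
theorem sortArrayByParity_foldA (xs : List Int) (od ev : List Int) :
    xs.foldl
      (fun (acc : List Int × List Int) i =>
        if PySem.Int.mod i 2 = 0 then (acc.1, acc.2 ++ [i]) else (acc.1 ++ [i], acc.2))
      (od, ev)
    = (od ++ xs.filter (fun x => !decide (PySem.Int.mod x 2 = 0)),
       ev ++ xs.filter (fun x => decide (PySem.Int.mod x 2 = 0))) := by
  induction xs generalizing od ev with
  | nil => simp only [List.foldl_nil, List.filter_nil, List.append_nil]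
  | cons x xs ih =>
    rw [List.foldl_cons, List.filter_cons, List.filter_cons]
    by_cases h : PySem.Int.mod x 2 = 0
    · rw [if_pos h, ih]
      simp only [h, decide_true, Bool.not_true, if_true, if_false, Bool.false_eq_true,
        List.append_assoc, List.singleton_append]
    · rw [if_neg h, ih]
      simp only [h, decide_false, Bool.not_false, if_true, if_false, Bool.false_eq_true,
        List.append_assoc, List.singleton_append]

-- the sort key of any Int is 0 or 1 (Python % with positive divisor)
theorem sortArrayByParity_key01 (x : Int) :
    PySem.Int.mod x 2 = 0 ∨ PySem.Int.mod x 2 = 1 := by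
  have h1 := PySem.Int.mod_nonneg x (b := 2) (by omega)
  have h2 := PySem.Int.mod_lt x (b := 2) (by omega)
  omega

-- stable insertion of an even element into (evens ++ odds) lands at the end of the evens
theorem sortArrayByParity_ins_even (x : Int) (ev od : List Int)
    (hx : PySem.Int.mod x 2 = 0)
    (hev : ∀ y ∈ ev, PySem.Int.mod y 2 = 0)
    (hod : ∀ y ∈ od, PySem.Int.mod y 2 = 1) :
    PySem.List.insertBy (fun a b => decide (PySem.Int.mod a 2 < PySem.Int.mod b 2)) x (ev ++ od)
      = ev ++ x :: od := by
  induction ev with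
  | nil =>
    cases od with
    | nil => rfl
    | cons y ys =>
      have hy := hod y (List.mem_cons_self)
      show PySem.List.insertBy _ x (y :: ys) = x :: y :: ys
      rw [PySem.List.insertBy]
      rw [if_pos (by rw [hx, hy]; decide)]
  | cons e es ih =>
    have he := hev e (List.mem_cons_self)
    show PySem.List.insertBy _ x (e :: (es ++ od)) = e :: (es ++ x :: od)
    rw [PySem.List.insertBy]
    rw [if_neg (by rw [hx, he]; decide)]
    rw [ih (fun y hy => hev y (List.mem_cons_of_mem _ hy))]

-- B's insertion-sort invariant: folding over xs from (evens ++ odds) appends the parity filters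
theorem sortArrayByParity_foldB (xs : List Int) (ev od : List Int)
    (hev : ∀ y ∈ ev, PySem.Int.mod y 2 = 0)
    (hod : ∀ y ∈ od, PySem.Int.mod y 2 = 1) :
    xs.foldl
      (fun acc x => PySem.List.insertBy (fun a b => decide (PySem.Int.mod a 2 < PySem.Int.mod b 2)) x acc)
      (ev ++ od)
    = (ev ++ xs.filter (fun x => decide (PySem.Int.mod x 2 = 0)))
      ++ (od ++ xs.filter (fun x => !decide (PySem.Int.mod x 2 = 0))) := by
  induction xs generalizing ev od with
  | nil => simp only [List.foldl_nil, List.filter_nil, List.append_nil]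
  | cons x xs ih =>
    rw [List.foldl_cons, List.filter_cons, List.filter_cons]
    rcases sortArrayByParity_key01 x with h | h
    · rw [sortArrayByParity_ins_even x ev od h hev hod,
        show ev ++ x :: od = (ev ++ [x]) ++ od from by simp,
        ih (ev ++ [x]) od
          (by intro y hy
              rcases List.mem_append.1 hy with hy | hy
              · exact hev y hy
              · rw [List.mem_singleton.1 hy]; exact h)
          hod]
      simp only [h, decide_true, Bool.not_true, if_true, if_false, Bool.false_eq_true,
        List.append_assoc, List.singleton_append]
    · rw [PySem.List.insertBy_of_forall_not_before _ x (ev ++ od) (by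
          intro y hy
          rcases List.mem_append.1 hy with hy | hy
          · rw [decide_eq_false_iff_not]; rw [h, hev y hy]; decide
          · rw [decide_eq_false_iff_not]; rw [h, hod y hy]; decide),
        show (ev ++ od) ++ [x] = ev ++ (od ++ [x]) from by simp,
        ih ev (od ++ [x]) hev
          (by intro y hy
              rcases List.mem_append.1 hy with hy | hy
              · exact hod y hy
              · rw [List.mem_singleton.1 hy]; exact h)]
      simp only [h, Bool.not_eq_true', List.append_assoc, List.singleton_append]
      norm_num

-- ===== VERDICT (by name: the statement is the Claim_ definition above) =====
theorem sortArrayByParity_spec : Claim_equal_sortArrayByParity := by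
  intro A _
  show sortArrayByParity A = sortArrayByParity_alt A
  unfold sortArrayByParity sortArrayByParity_alt
  rw [PySem.List.sorted_eq_foldl_insertBy]
  have hB := sortArrayByParity_foldB A [] [] (by intro y hy; cases hy) (by intro y hy; cases hy)
  simp only [List.nil_append] at hB
  rw [hB, sortArrayByParity_foldA A [] []]
  simp only [List.nil_append]
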